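-- pv_equiv track=rewrite | github.com/kaagaj-bottle/misc | search_text.py | create_word_map
-- ===== SOURCE A (Python) =====
-- from typing import List, Dict, Tuple
--
-- def create_word_map(sentences: List[str]) -> Tuple[Dict, bool]:
--     lenSentences = len(sentences)
--     map = {}
--     for i in range(lenSentences):
--
--         wordList = sentences[i].strip().split(" ")
--         lenWords = len(wordList)
--
--         for j in range(lenWords):
--
--             if wordList[j] == "":
--                 continue
--             if wordList[j] in map:
--                 map[wordList[j]].append(i)
--             else:
--                 map[wordList[j]] = [i]
--
--     return map, True
-- ===== SOURCE B (Python) =====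
-- def create_word_map(sentences):
--     # different algorithm: flatten to (word, index) tokens, dedup keys in first-appearance
--     # order, then build each word's index list by a per-key scan of the token list (no
--     # incremental dict-value updating at all).
--     tokens = []
--     for i, s in enumerate(sentences):
--         for w in s.strip().split(" "):
--             if w:
--                 tokens.append((w, i))
--     seen = set()
--     keys = []
--     for w, _ in tokens:
--         if w not in seen:
--             seen.add(w)
--             keys.append(w)
--     return {k: [i for w, i in tokens if w == k] for k in keys}, True
-- ===== Notes on version B (the rewrite author's own statement) =====
-- stated objective: alternative
-- what changed: Instead of A's nested loops that incrementally update a dict value per occurrence, B flattens the input to an ordered (word, index) token list, dedups the words in first-appearance order, and builds each word's index list by a per-key scan of the token list (grouping by repeated filtering, no dict updating); it trades a factor of distinct-word-count for the removal of the mutable dict.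
import Mathlib
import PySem

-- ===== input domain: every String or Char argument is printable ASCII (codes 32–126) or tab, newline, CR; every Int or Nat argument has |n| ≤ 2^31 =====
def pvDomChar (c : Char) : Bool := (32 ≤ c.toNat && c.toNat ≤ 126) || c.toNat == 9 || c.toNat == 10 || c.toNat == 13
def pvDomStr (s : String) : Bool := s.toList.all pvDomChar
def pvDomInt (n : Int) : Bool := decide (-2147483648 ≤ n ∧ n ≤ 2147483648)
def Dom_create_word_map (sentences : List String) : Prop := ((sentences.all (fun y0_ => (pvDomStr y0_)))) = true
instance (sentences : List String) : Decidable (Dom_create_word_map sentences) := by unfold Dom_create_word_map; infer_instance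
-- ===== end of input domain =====

-- B replaces A's incremental dict-updating loops by a flatten / dedup-keys / group-by-scan
-- pipeline (no mutable dict); alternative algorithm of different shape, not claimed faster.

-- ===== PORT A =====
def create_word_map (sentences : List String) : (List (String × List Int)) × Bool :=
  let lenSentences : Int := PySem.List.len sentences
  let m : PySem.Dict String (List Int) :=
    (PySem.List.pyRange 0 lenSentences 1).foldl (fun m i =>
      let wordList : List String :=
        ((PySem.Str.split? (PySem.Str.strip (PySem.List.pyGetD sentences i "")) " ").getD [])
      let lenWords : Int := PySem.List.len wordList
      (PySem.List.pyRange 0 lenWords 1).foldl (fun m j =>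
        let w := PySem.List.pyGetD wordList j ""
        if w = "" then m
        else if m.contains w then m.modify w [] (fun l => l ++ [i])
        else m.insert w [i]) m) PySem.Dict.empty
  (m.items, true)

-- ===== PORT B =====
def create_word_map_alt (sentences : List String) : (List (String × List Int)) × Bool :=
  let tokens : List (String × Int) :=
    (PySem.List.enumerate sentences).flatMap (fun p =>
      (((PySem.Str.split? (PySem.Str.strip p.2) " ").getD []).filter (fun w => w != "")).map
        (fun w => (w, p.1)))
  let keys : PySem.Set String := PySem.Set.ofList (tokens.map Prod.fst)
  (keys.map (fun k => (k, (tokens.filter (fun q => q.1 == k)).map Prod.snd)), true)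

-- ===== PRECONDITION & SPEC =====
def Spec_create_word_map (sentences : List String) (out : (List (String × List Int)) × Bool) : Prop := out = create_word_map_alt sentences
instance (sentences : List String) (out : (List (String × List Int)) × Bool) : Decidable (Spec_create_word_map sentences out) := by unfold Spec_create_word_map; infer_instance

-- ===== CLAIM (what is proved, stated in full; the proofs are below) =====
def Claim_equal_create_word_map : Prop := ∀ (sentences : List String), Dom_create_word_map sentences → Spec_create_word_map sentences (create_word_map sentences)

-- ===== LEMMAS AND PROOFS =====

-- A's index loop over the word list = a structural fold over it
theorem pvFoldIdx (i : Int) (ws : List String) (m : PySem.Dict String (List Int)) :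
    (PySem.List.pyRange 0 (PySem.List.len ws) 1).foldl
      (fun m j =>
        let w := PySem.List.pyGetD ws j ""
        if w = "" then m
        else if m.contains w then m.modify w [] (fun l => l ++ [i])
        else m.insert w [i]) m
    = ws.foldl
      (fun m w =>
        if w = "" then m
        else if m.contains w then m.modify w [] (fun l => l ++ [i])
        else m.insert w [i]) m := by
  simp only [PySem.List.len_eq]
  exact PySem.List.foldl_pyRange_zero_pyGetD' ws ""
    (fun m w => if w = "" then m
      else if m.contains w then m.modify w [] (fun l => l ++ [i])
      else m.insert w [i]) m

-- folding over a flatMap = nested fold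
theorem pvFoldlFlatMap {α β γ : Type} (l : List α) (g : α → List β) (f : γ → β → γ) (init : γ) :
    (l.flatMap g).foldl f init = l.foldl (fun a x => (g x).foldl f a) init := by
  induction l generalizing init with
  | nil => rfl
  | cons x xs ih => simp [List.foldl_append, ih]

-- for one sentence, A's inner loop = a grouping fold over that sentence's (word, index) tokens
theorem pvInnerEq (i : Int) (s : String) (m : PySem.Dict String (List Int)) :
    (PySem.List.pyRange 0 (PySem.List.len ((PySem.Str.split? (PySem.Str.strip s) " ").getD [])) 1).foldl
      (fun m j =>
        let w := PySem.List.pyGetD ((PySem.Str.split? (PySem.Str.strip s) " ").getD []) j ""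
        if w = "" then m
        else if m.contains w then m.modify w [] (fun l => l ++ [i])
        else m.insert w [i]) m
    = ((((PySem.Str.split? (PySem.Str.strip s) " ").getD []).filter (fun w => w != "")).map
        (fun w => (w, i))).foldl (fun d q => d.modify q.1 [] (fun l => l ++ [q.2])) m := by
  rw [pvFoldIdx, List.foldl_map, List.foldl_filter]
  rw [show (fun (m : PySem.Dict String (List Int)) (w : String) =>
        if w = "" then m
        else if m.contains w then m.modify w [] (fun l => l ++ [i])
        else m.insert w [i])
      = (fun (x : PySem.Dict String (List Int)) (y : String) =>
        if (y != "") = true then x.modify (y, i).1 [] (fun l => l ++ [(y, i).2]) else x) from by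
    funext x y
    by_cases h : y = ""
    · simp [h]
    · by_cases hc : x.contains y
      · simp [h, hc]
      · simp [h, hc, PySem.Dict.modify,
          PySem.Dict.getD_of_not_contains _ _ (show x.contains y = false by simpa using hc)]]

-- B's token list
def pvTokens (sentences : List String) : List (String × Int) :=
  (PySem.List.enumerate sentences).flatMap (fun p =>
    (((PySem.Str.split? (PySem.Str.strip p.2) " ").getD []).filter (fun w => w != "")).map
      (fun w => (w, p.1)))

-- A's whole dict-building loop = one grouping fold over B's token list
theorem pvAEqFold (sentences : List String) :
    create_word_map sentences
    = (((pvTokens sentences).foldl (fun d q => d.modify q.1 [] (fun l => l ++ [q.2]))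
        PySem.Dict.empty).items, true) := by
  unfold create_word_map pvTokens
  refine congrArg (fun d : PySem.Dict String (List Int) => (d.items, true)) ?_
  rw [pvFoldlFlatMap, PySem.List.enumerate_eq_map_pyRange sentences "", List.foldl_map]
  rw [show (fun (m : PySem.Dict String (List Int)) (i : Int) =>
        (PySem.List.pyRange 0 (PySem.List.len ((PySem.Str.split? (PySem.Str.strip (PySem.List.pyGetD sentences i "")) " ").getD [])) 1).foldl
          (fun m j =>
            let w := PySem.List.pyGetD ((PySem.Str.split? (PySem.Str.strip (PySem.List.pyGetD sentences i "")) " ").getD []) j ""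
            if w = "" then m
            else if m.contains w then m.modify w [] (fun l => l ++ [i])
            else m.insert w [i]) m)
      = (fun (m : PySem.Dict String (List Int)) (i : Int) =>
        ((((PySem.Str.split? (PySem.Str.strip (PySem.List.pyGetD sentences i "")) " ").getD []).filter (fun w => w != "")).map
          (fun w => (w, i))).foldl (fun d q => d.modify q.1 [] (fun l => l ++ [q.2])) m) from by
    funext m i
    exact pvInnerEq i (PySem.List.pyGetD sentences i "") m]

-- the items of that grouping fold = dedup'd keys paired with per-key filtered indices
theorem pvItemsGroup (ts : List (String × Int)) :
    ((ts.foldl (fun d q => d.modify q.1 [] (fun l => l ++ [q.2]))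
        PySem.Dict.empty).items : List (String × List Int))
    = (PySem.Set.ofList (ts.map Prod.fst)).map
        (fun k => (k, (ts.filter (fun q => q.1 == k)).map Prod.snd)) := by
  have hkeys : (ts.foldl (fun d q => d.modify q.1 [] (fun l => l ++ [q.2]))
      (PySem.Dict.empty : PySem.Dict String (List Int))).keys
      = PySem.Set.ofList (ts.map Prod.fst) := by
    rw [PySem.Dict.keys_foldl_modify_key ts Prod.fst [] (fun _ q l => l ++ [q.2])]
    simp [PySem.Dict.keys_empty, PySem.Set.update_nil_left]
  have hnd : (ts.foldl (fun d q => d.modify q.1 [] (fun l => l ++ [q.2]))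
      (PySem.Dict.empty : PySem.Dict String (List Int))).keys.Nodup := by
    exact PySem.Dict.nodup_keys_foldl_modify_key ts Prod.fst [] (fun _ q l => l ++ [q.2]) _
      (by simp [PySem.Dict.keys_empty])
  rw [PySem.Dict.items_eq_map_keys _ hnd [], hkeys]
  refine List.map_congr_left (fun k _ => ?_)
  rw [PySem.Dict.getD_foldl_modify_append ts PySem.Dict.empty k]
  simp [PySem.Dict.getD_empty]

-- ===== VERDICT (by name: the statement is the Claim_ definition above) =====
theorem create_word_map_spec : Claim_equal_create_word_map := by
  intro sentences _
  unfold Spec_create_word_map create_word_map_alt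
  rw [pvAEqFold sentences, pvItemsGroup]
  rfl
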